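-- pv_equiv track=rewrite | github.com/finehaceda/all_hm_save | djangot2/polls/Code/encode_decode_m/getPrimerPair.py | check3End
-- ===== SOURCE A (Python) =====
-- def check3End(sSeq, iLen=8):
--     '''
--     Check 3' to avoid repeats of more than three consecutive bases
--     The rule is: check iLen bases at the end of 3', if there are 4 consecutive repeating bases, return False, otherwise return True
--     '''
--     if len(sSeq) < iLen or iLen < 4:
--         return True
--
--     def f(a): return a[0] == a[1] == a[2] == a[3]
--     for i in range(iLen-4):
--         if f(sSeq[-iLen+i: -iLen+i+4]):
--             return False
--     if f(sSeq[-4:]):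
--         return False
--     return True
-- ===== SOURCE B (Python) =====
-- def check3End(sSeq, iLen=8):
--     '''
--     Check 3' to avoid repeats of more than three consecutive bases
--     The rule is: check iLen bases at the end of 3', if there are 4 consecutive repeating bases, return False, otherwise return True
--     '''
--     if len(sSeq) < iLen or iLen < 4:
--         return True
--     tail = sSeq[-iLen:]
--     prev = tail[0]
--     cnt = 1
--     for c in tail[1:]:
--         if c == prev:
--             cnt += 1
--             if cnt >= 4:
--                 return False
--         else:
--             prev = c
--             cnt = 1
--     return True
-- ===== Notes on version B (the rewrite author's own statement) =====
-- stated objective: simpler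
-- what changed: Replaces A's repeated 4-element window slice comparisons (with a special-cased final window) by a single run-length counter scan over the tail that resets on a base change and fails as soon as a run reaches 4.
import Mathlib
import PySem

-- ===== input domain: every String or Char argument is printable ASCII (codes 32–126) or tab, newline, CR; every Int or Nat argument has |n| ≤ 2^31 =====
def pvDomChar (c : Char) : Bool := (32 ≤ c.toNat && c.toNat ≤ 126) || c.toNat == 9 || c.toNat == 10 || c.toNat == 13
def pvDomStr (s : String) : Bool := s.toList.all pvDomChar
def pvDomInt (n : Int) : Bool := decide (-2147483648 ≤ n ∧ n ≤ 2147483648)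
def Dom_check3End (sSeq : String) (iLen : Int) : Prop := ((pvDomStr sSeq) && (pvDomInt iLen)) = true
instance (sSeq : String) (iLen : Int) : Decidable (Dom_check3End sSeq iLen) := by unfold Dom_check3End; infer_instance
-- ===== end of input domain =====

-- B replaces A's per-position 4-element window slices (plus special-cased final window) with one
-- run-length-counter scan of the tail; same results, simpler single-state loop.

-- ===== PORT A =====

-- f(a): a[0] == a[1] == a[2] == a[3]; every slice A passes in has length exactly 4
-- (guard guarantees iLen ≤ len(sSeq) and 4 ≤ iLen), so the chained comparison is this match.
def fA (a : List Char) : Bool :=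
  match a with
  | c0 :: c1 :: c2 :: c3 :: _ => c0 == c1 && c1 == c2 && c2 == c3
  | _ => false

def check3End (sSeq : String) (iLen : Int) : Bool :=
  let s := sSeq.toList
  if decide ((PySem.Str.len sSeq) < iLen) || decide (iLen < 4) then true
  else
    -- 'for i in range(iLen-4): if f(sSeq[-iLen+i : -iLen+i+4]): return False'
    if (PySem.List.pyRange 0 (iLen - 4) 1).any
        (fun i => fA (PySem.List.slice s (some (-iLen + i)) (some (-iLen + i + 4)))) then false
    else if fA (PySem.List.slice s (some (-4)) none) then false
    else true

-- ===== PORT B =====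

-- the run-length loop: prev = last base seen, cnt = length of the current run
def bLoop (prev : Char) (cnt : Int) : List Char → Bool
  | [] => true
  | c :: rest =>
      if c == prev then
        (if cnt + 1 ≥ 4 then false else bLoop c (cnt + 1) rest)
      else bLoop c 1 rest

def check3End_alt (sSeq : String) (iLen : Int) : Bool :=
  let s := sSeq.toList
  if decide ((PySem.Str.len sSeq) < iLen) || decide (iLen < 4) then true
  else
    match PySem.List.slice s (some (-iLen)) none with
    | [] => true   -- unreachable: 4 ≤ iLen ≤ len(sSeq) makes tail nonempty (tail[0] in Source B)
    | p :: rest => bLoop p 1 rest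

-- ===== PRECONDITION & SPEC =====
def Spec_check3End (sSeq : String) (iLen : Int) (out : Bool) : Prop := out = check3End_alt sSeq iLen
instance (sSeq : String) (iLen : Int) (out : Bool) : Decidable (Spec_check3End sSeq iLen out) := by unfold Spec_check3End; infer_instance

-- ===== CLAIM (what is proved, stated in full; the proofs are below) =====
def Claim_equal_check3End : Prop := ∀ (sSeq : String) (iLen : Int), Dom_check3End sSeq iLen → Spec_check3End sSeq iLen (check3End sSeq iLen)

-- ===== LEMMAS AND PROOFS =====

-- 'there are 4 consecutive equal characters somewhere in t', as a sliding-window scan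
def win4 : List Char → Bool
  | c0 :: c1 :: c2 :: c3 :: rest => (c0 == c1 && c1 == c2 && c2 == c3) || win4 (c1 :: c2 :: c3 :: rest)
  | _ => false

lemma win4_eq_any (t : List Char) :
    win4 t = (List.range (t.length - 3)).any (fun j => fA ((t.drop j).take 4)) := by
  induction t using win4.induct with
  | case1 c0 c1 c2 c3 rest ih =>
      have hlen : (c0 :: c1 :: c2 :: c3 :: rest).length - 3 = rest.length + 1 := by
        simp
      have h2 : ((c1 :: c2 :: c3 :: rest).length - 3) = rest.length := by simp
      have hfun : ((fun j => fA ((List.drop j (c0 :: c1 :: c2 :: c3 :: rest)).take 4)) ∘ Nat.succ)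
          = (fun j => fA ((List.drop j (c1 :: c2 :: c3 :: rest)).take 4)) := by
        funext j; simp [Function.comp]
      rw [win4, ih, h2, hlen, List.range_succ_eq_map, List.any_cons, List.any_map, hfun]
      congr 1
  | case2 t h =>
      rcases t with _|⟨a,_|⟨b,_|⟨c,_|⟨d,tl⟩⟩⟩⟩
      · rfl
      · rfl
      · rfl
      · rfl
      · exact (h a b c d tl rfl).elim

lemma win4_cons (a b c d : Char) (tl : List Char) (h : ¬(a = b ∧ b = c ∧ c = d)) :
    win4 (a :: b :: c :: d :: tl) = win4 (b :: c :: d :: tl) := by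
  rw [win4]
  cases h1 : a == b <;> cases h2 : b == c <;> cases h3 : c == d <;> simp_all

lemma win4_short (l : List Char) (h : l.length ≤ 3) : win4 l = false := by
  rcases l with _|⟨a,_|⟨b,_|⟨c,_|⟨d,tl⟩⟩⟩⟩
  · rfl
  · rfl
  · rfl
  · rfl
  · exfalso; simp only [List.length_cons] at h; omega

lemma win4_skip1 (p c : Char) (rs : List Char) (h : p ≠ c) :
    win4 (p :: c :: rs) = win4 (c :: rs) := by
  rcases rs with _|⟨d,_|⟨e,tl⟩⟩
  · rw [win4_short _ (by simp), win4_short _ (by simp)]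
  · rw [win4_short _ (by simp), win4_short _ (by simp)]
  · exact win4_cons p c d e tl (by tauto)

lemma win4_skip2 (p c : Char) (rs : List Char) (h : p ≠ c) :
    win4 (p :: p :: c :: rs) = win4 (c :: rs) := by
  rcases rs with _|⟨d,tl⟩
  · rw [win4_short _ (by simp), win4_short _ (by simp)]
  · exact (win4_cons p p c d tl (by tauto)).trans (win4_skip1 p c (d :: tl) h)

lemma win4_skip3 (p c : Char) (rs : List Char) (h : p ≠ c) :
    win4 (p :: p :: p :: c :: rs) = win4 (c :: rs) := by
  exact (win4_cons p p p c rs (by tauto)).trans (win4_skip2 p c rs h)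

lemma win4_repl_skip (k : Nat) (p c : Char) (rs : List Char) (hk : k ≤ 3) (h : p ≠ c) :
    win4 (List.replicate k p ++ c :: rs) = win4 (c :: rs) := by
  interval_cases k
  · rfl
  · simpa [List.replicate] using win4_skip1 p c rs h
  · simpa [List.replicate] using win4_skip2 p c rs h
  · simpa [List.replicate] using win4_skip3 p c rs h

lemma bLoop_spec (rest : List Char) (p : Char) (k : Nat) (h1 : 1 ≤ k) (h3 : k ≤ 3) :
    bLoop p (k : Int) rest = !win4 (List.replicate k p ++ rest) := by
  induction rest generalizing p k with
  | nil =>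
      rw [win4_short _ (by simp; omega)]
      rfl
  | cons c rs ih =>
      rw [bLoop]
      by_cases hc : (c == p) = true
      · have hcp : c = p := eq_of_beq hc
        subst hcp
        rw [if_pos hc]
        by_cases hk3 : k = 3
        · subst hk3
          rw [if_pos (by omega)]
          have hw : win4 (List.replicate 3 c ++ c :: rs) = true := by
            rw [show (List.replicate 3 c ++ c :: rs) = c :: c :: c :: c :: rs by simp [List.replicate]]
            rw [win4]; simp
          rw [hw]; rfl
        · rw [if_neg (by omega)]
          have hcast : (k : Int) + 1 = ((k + 1 : Nat) : Int) := by push_cast; ring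
          rw [hcast, ih c (k + 1) (by omega) (by omega)]
          congr 2
          rw [List.replicate_succ', List.append_assoc]
          rfl
      · rw [if_neg hc]
        have hne : p ≠ c := fun he => hc (by simp [he])
        rw [show (1 : Int) = ((1 : Nat) : Int) from rfl, ih c 1 (by omega) (by omega)]
        rw [win4_repl_skip k p c rs h3 hne]
        simp [List.replicate]

lemma any_congr_mem {α : Type} (l : List α) (p q : α → Bool) (h : ∀ x ∈ l, p x = q x) :
    l.any p = l.any q := by
  induction l with
  | nil => rfl
  | cons a t ih => simp only [List.any_cons, h a (by simp), ih (fun x hx => h x (by simp [hx]))]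

lemma fA_take (l : List Char) : fA (l.take 4) = fA l := by
  rcases l with _|⟨a,_|⟨b,_|⟨c,_|⟨d,tl⟩⟩⟩⟩ <;> rfl

lemma slice_window (xs : List Char) (u : Nat) (hu4 : 4 < u) (hun : u ≤ xs.length) :
    PySem.List.slice xs (some (-(u : Int))) (some (-(u : Int) + 4)) =
      (xs.drop (xs.length - u)).take 4 := by
  have h1 : (-(u : Int) + 4) = -(((u - 4 : Nat)) : Int) := by omega
  rw [h1]
  simp only [PySem.List.slice]
  rw [PySem.List.clampIdx_neg_natCast _ _ (by omega), PySem.List.clampIdx_neg_natCast _ _ (by omega)]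
  congr 1
  omega


lemma B_eq (sSeq : String) (iLen : Int) (h4 : 4 ≤ iLen) (hl : iLen ≤ (sSeq.toList.length : Int)) :
    check3End_alt sSeq iLen = !win4 (sSeq.toList.drop (sSeq.toList.length - iLen.toNat)) := by
  unfold check3End_alt
  have hcond : (decide ((PySem.Str.len sSeq) < iLen) || decide (iLen < 4)) = false := by
    simp only [PySem.Str.len_eq, Bool.or_eq_false_iff, decide_eq_false_iff_not]
    omega
  rw [hcond]
  simp only [Bool.false_eq_true, if_false]
  set s := sSeq.toList with hs
  have hik : iLen = ((iLen.toNat : Nat) : Int) := by omega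
  have hneg : -iLen = -((iLen.toNat : Nat) : Int) := by omega
  rw [hneg, PySem.List.slice_from_neg_natCast _ _ (by omega)]
  have hlen : (s.drop (s.length - iLen.toNat)).length = iLen.toNat := by
    rw [List.length_drop]; omega
  cases htail : s.drop (s.length - iLen.toNat) with
  | nil => rw [htail] at hlen; simp at hlen; omega
  | cons p rest =>
      show bLoop p 1 rest = _
      rw [show (1 : Int) = ((1 : Nat) : Int) from rfl, bLoop_spec rest p 1 (by omega) (by omega)]
      simp [List.replicate]

lemma A_eq (sSeq : String) (iLen : Int) (h4 : 4 ≤ iLen) (hl : iLen ≤ (sSeq.toList.length : Int)) :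
    check3End sSeq iLen = !win4 (sSeq.toList.drop (sSeq.toList.length - iLen.toNat)) := by
  unfold check3End
  have hcond : (decide ((PySem.Str.len sSeq) < iLen) || decide (iLen < 4)) = false := by
    simp only [PySem.Str.len_eq, Bool.or_eq_false_iff, decide_eq_false_iff_not]
    omega
  rw [hcond]
  simp only [Bool.false_eq_true, if_false]
  set s := sSeq.toList with hs
  set n := s.length with hn
  set k := iLen.toNat with hkdef
  have hk4 : 4 ≤ k := by omega
  have hkn : k ≤ n := by omega
  set tail := s.drop (n - k) with htail
  have htlen : tail.length = k := by simp only [htail, List.length_drop]; omega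
  -- the loop: any over range (k-4) of window j of tail
  have hrange : PySem.List.pyRange 0 (iLen - 4) 1 = (List.range (k - 4)).map (fun j : Nat => (0 : Int) + (j : Int)) := by
    rw [PySem.List.pyRange_one, show (iLen - 4 - 0).toNat = k - 4 by omega]
  have hany : ((PySem.List.pyRange 0 (iLen - 4) 1).any
      (fun i => fA (PySem.List.slice s (some (-iLen + i)) (some (-iLen + i + 4)))))
      = (List.range (k - 4)).any (fun j => fA ((tail.drop j).take 4)) := by
    rw [hrange, List.any_map]
    apply any_congr_mem
    intro j hj
    rw [List.mem_range] at hj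
    have hji : (-iLen + ((0 : Int) + (j : Int))) = -(((k - j : Nat)) : Int) := by omega
    have hji4 : (-iLen + ((0 : Int) + (j : Int)) + 4) = -(((k - j : Nat)) : Int) + 4 := by omega
    simp only [Function.comp]
    rw [hji4, hji, slice_window s (k - j) (by omega) (by omega)]
    rw [htail, List.drop_drop]
    congr 3
    omega
  -- final window
  have hfin : PySem.List.slice s (some (-4)) none = tail.drop (k - 4) := by
    rw [PySem.List.slice_from_neg_ofNat s 4 (by omega), htail, List.drop_drop]
    congr 1
    omega
  have hfinA : fA (PySem.List.slice s (some (-4)) none) = fA ((tail.drop (k - 4)).take 4) := by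
    rw [hfin, fA_take]
  rw [hany, hfinA]
  rw [win4_eq_any, htlen]
  have hsplit : List.range (k - 3) = List.range ((k - 4) + 1) := by congr 1; omega
  rw [hsplit, List.range_succ, List.any_append]
  cases h1 : (List.range (k - 4)).any (fun j => fA ((tail.drop j).take 4)) <;>
    cases h2 : fA ((tail.drop (k - 4)).take 4) <;> simp [h2]

-- ===== VERDICT (by name: the statement is the Claim_ definition above) =====
theorem check3End_spec : Claim_equal_check3End := by
  intro sSeq iLen _
  unfold Spec_check3End
  by_cases hg : iLen ≤ (sSeq.toList.length : Int) ∧ 4 ≤ iLen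
  · rw [A_eq sSeq iLen hg.2 hg.1, B_eq sSeq iLen hg.2 hg.1]
  · have hcond : (decide ((PySem.Str.len sSeq) < iLen) || decide (iLen < 4)) = true := by
      simp only [PySem.Str.len_eq, Bool.or_eq_true, decide_eq_true_eq]; omega
    simp only [check3End, check3End_alt, hcond, if_true]
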